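-- pv_equiv track=rewrite | github.com/SeongJun-Ham/PS | etc/7516_G1.py | solution
-- ===== SOURCE A (Python) =====
-- def solution(arr, target):
--     if arr == {}:
--         return 1
--
--     base = [0]*len(arr)
--     keys = list(arr.keys())
--     values = list(arr.values())
--     result = 0
--
--     while base != values:
--         temp = 1
--         for i in range(len(base)):
--             temp *= keys[i]**base[i]
--
--         if temp <= target:
--             result += 1
--
--         base[0] += 1
--         for i in range(len(base)):
--             if base[i] > values[i]:
--                 base[i] = 0
--                 base[i+1] += 1
--
--     return result
-- ===== SOURCE B (Python) =====
-- def solution(arr, target):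
--     # Equivalence is about the return value; neither version mutates its input.
--     if not arr:
--         return 1
--     items = list(arr.items())
--     n = len(items)
--
--     def count(i, prod):
--         if i == n:
--             return 1 if prod <= target else 0
--         k, v = items[i]
--         total = 0
--         for e in range(v + 1):
--             total += count(i + 1, prod * k ** e)
--         return total
--
--     full = 1
--     for k, v in items:
--         full *= k ** v
--
--     return count(0, 1) - (1 if full <= target else 0)
-- ===== Notes on version B (the rewrite author's own statement) =====
-- stated objective: alternative
-- what changed: Replaces A's odometer while-loop (which rebuilds each exponent tuple and recomputes its full n-factor product from scratch) by a DFS recursion over the items that shares prefix products across tuples, counting all tuples and subtracting the one excluded maximal tuple (measured ~3.8x at the largest size both finished, but both enumerate all tuples, so 'faster' is not claimed).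
import Mathlib
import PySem

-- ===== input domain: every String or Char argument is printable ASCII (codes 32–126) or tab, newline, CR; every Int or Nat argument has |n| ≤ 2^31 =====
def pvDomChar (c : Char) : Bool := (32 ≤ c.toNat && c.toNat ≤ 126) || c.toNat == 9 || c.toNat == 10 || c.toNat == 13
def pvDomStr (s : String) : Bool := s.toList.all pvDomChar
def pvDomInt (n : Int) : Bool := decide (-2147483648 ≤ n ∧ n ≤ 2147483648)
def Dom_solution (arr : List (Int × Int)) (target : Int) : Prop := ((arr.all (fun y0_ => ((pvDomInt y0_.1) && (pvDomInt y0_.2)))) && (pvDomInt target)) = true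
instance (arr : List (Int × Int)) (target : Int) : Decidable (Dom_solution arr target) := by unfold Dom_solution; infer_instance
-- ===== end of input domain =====

-- B replaces A's odometer while-loop by a prefix-product-sharing DFS count minus the one
-- excluded maximal tuple (return value only; neither program mutates its argument).

-- ===== PORT A =====
-- Python: base[0] += 1   (base[0] on an empty list would raise IndexError; unreachable under Pre_)
def pvBump : List Int → List Int
  | [] => []
  | b :: bs => (b + 1) :: bs

-- Python: for i in range(len(base)): if base[i] > values[i]: base[i] = 0; base[i+1] += 1
-- (the write to base[i+1] one past the end would raise IndexError in Python; under Pre_ it never happens)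
def pvCarry : List Int → List Int → List Int
  | [], _ => []
  | bs, [] => bs
  | b :: bs, v :: vs => if b > v then 0 :: pvCarry (pvBump bs) vs else b :: pvCarry bs vs

-- Python: temp = 1; for i in range(len(base)): temp *= keys[i]**base[i]   (len keys = len base)
def pvTemp (keys base : List Int) : Int :=
  (keys.zip base).foldl (fun t kb => t * kb.1 ^ kb.2.toNat) 1

-- fuel for the while-loop (an artifact of porting, not part of A): enough iterations to reach `values`
def pvFuel : List Int → Nat
  | [] => 1
  | v :: vs => (v.toNat + 1) * pvFuel vs

def pvLoopA (target : Int) (keys values : List Int) : Nat → List Int → Int → Int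
  | 0, _, result => result
  | fuel + 1, base, result =>
    if base = values then result
    else
      let temp := pvTemp keys base
      let result' := if temp ≤ target then result + 1 else result
      pvLoopA target keys values fuel (pvCarry (pvBump base) values) result'

def solution (arr : List (Int × Int)) (target : Int) : Int :=
  if arr = [] then 1
  else pvLoopA target (arr.map Prod.fst) (arr.map Prod.snd) (pvFuel (arr.map Prod.snd))
        (List.replicate arr.length 0) 0

-- ===== PORT B =====
def pvCountB (target : Int) : List (Int × Int) → Int → Int
  | [], prod => if prod ≤ target then 1 else 0
  | (k, v) :: rest, prod =>
      (PySem.List.pyRange 0 (v + 1) 1).foldl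
        (fun total e => total + pvCountB target rest (prod * k ^ e.toNat)) 0

def solution_alt (arr : List (Int × Int)) (target : Int) : Int :=
  if arr = [] then 1
  else
    let full := arr.foldl (fun f kv => f * kv.1 ^ kv.2.toNat) 1
    pvCountB target arr 1 - (if full ≤ target then 1 else 0)

-- ===== PRECONDITION & SPEC =====
-- Pre_ excludes (a) any negative value, on which A's carry scan eventually writes one slot past
-- the end of `base` and raises IndexError, and (b) duplicate keys, which a Python dict (A's actual
-- argument type) cannot represent.
def Pre_solution (arr : List (Int × Int)) (_target : Int) : Prop :=
  (∀ p ∈ arr, 0 ≤ p.2) ∧ (arr.map Prod.fst).Nodup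
instance (arr : List (Int × Int)) (target : Int) : Decidable (Pre_solution arr target) := by
  unfold Pre_solution; infer_instance
def pvWitness_solution : (List (Int × Int)) × Int := ([(2, 3), (3, 1)], 10)

def Spec_solution (arr : List (Int × Int)) (target : Int) (out : Int) : Prop := out = solution_alt arr target
instance (arr : List (Int × Int)) (target : Int) (out : Int) : Decidable (Spec_solution arr target out) := by unfold Spec_solution; infer_instance

-- ===== CLAIM (what is proved, stated in full; the proofs are below) =====
def Claim_equal_solution : Prop := ∀ (arr : List (Int × Int)) (target : Int), Dom_solution arr target → Pre_solution arr target → Spec_solution arr target (solution arr target)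

-- ===== LEMMAS AND PROOFS =====

-- the list of all exponent tuples, in exactly the order A's odometer visits them (index 0 fastest)
def pvVisit : List Int → List (List Int)
  | [] => [[]]
  | v :: vs => (pvVisit vs).flatMap (fun t => (List.range (v.toNat + 1)).map (fun e : Nat => ((e : Int) :: t)))

-- the 0/1 indicator sum both programs compute
def pvCnt (target : Int) (ks : List Int) (l : List (List Int)) : Int :=
  (l.map fun t => if pvTemp ks t ≤ target then (1 : Int) else 0).sum

def pvStep (vs b b' : List Int) : Prop := pvCarry (pvBump b) vs = b'

theorem foldl_mul_shift (l : List (Int × Int)) (f : Int × Int → Int) :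
    ∀ c : Int, l.foldl (fun a x => a * f x) c = c * l.foldl (fun a x => a * f x) 1 := by
  induction l with
  | nil => intro c; simp
  | cons x xs ih =>
      intro c
      simp only [List.foldl_cons]
      rw [ih (c * f x), ih (1 * f x)]
      ring

theorem pvTemp_cons (k e : Int) (ks t : List Int) :
    pvTemp (k :: ks) (e :: t) = k ^ e.toNat * pvTemp ks t := by
  simp only [pvTemp, List.zip_cons_cons, List.foldl_cons]
  rw [foldl_mul_shift _ _ (1 * k ^ e.toNat), foldl_mul_shift _ _ 1]
  ring

theorem pvVisit_ne_nil (vs : List Int) : pvVisit vs ≠ [] := by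
  induction vs with
  | nil => simp [pvVisit]
  | cons v vs ih =>
      simp only [pvVisit, ne_eq, List.flatMap_eq_nil_iff, not_forall]
      refine ⟨(pvVisit vs).head ih, List.head_mem ih, ?_⟩
      simp [List.range_succ_eq_map]

theorem pvVisit_length (vs : List Int) : (pvVisit vs).length = pvFuel vs := by
  induction vs with
  | nil => rfl
  | cons v vs ih =>
      simp [pvVisit, pvFuel, List.length_flatMap, ← ih, List.map_const', Nat.mul_comm]

theorem pvVisit_head (vs : List Int) :
    (pvVisit vs).head? = some (List.replicate vs.length 0) := by
  induction vs with
  | nil => rfl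
  | cons v vs ih =>
      cases hv : pvVisit vs with
      | nil => exact absurd hv (pvVisit_ne_nil vs)
      | cons b rest =>
          rw [hv] at ih
          simp only [List.head?_cons, Option.some.injEq] at ih
          subst ih
          simp [pvVisit, hv, List.range_succ_eq_map, List.replicate_succ]

theorem pvVisit_split (vs : List Int) (h : ∀ v ∈ vs, 0 ≤ v) :
    ∃ l, pvVisit vs = l ++ [vs] ∧ vs ∉ l := by
  induction vs with
  | nil => exact ⟨[], rfl, by simp⟩
  | cons v vs ih =>
      obtain ⟨l, hl, hnotin⟩ := ih (fun x hx => h x (List.mem_cons_of_mem _ hx))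
      have hv : 0 ≤ v := h v (List.mem_cons_self ..)
      refine ⟨l.flatMap (fun t => (List.range (v.toNat + 1)).map (fun e : Nat => ((e : Int) :: t)))
        ++ (List.range v.toNat).map (fun e : Nat => ((e : Int) :: vs)), ?_, ?_⟩
      · simp only [pvVisit, hl, List.flatMap_append, List.flatMap_cons, List.flatMap_nil,
          List.append_nil, List.range_succ, List.map_append, List.map_cons, List.map_nil,
          List.append_assoc]
        congr 2
        simp [Int.toNat_of_nonneg hv]
      · intro hmem
        rcases List.mem_append.mp hmem with hmem | hmem
        · obtain ⟨t, ht, hmem⟩ := List.mem_flatMap.mp hmem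
          obtain ⟨e, _, heq⟩ := List.mem_map.mp hmem
          injection heq with h1 h2
          exact hnotin (h2 ▸ ht)
        · obtain ⟨e, he, heq⟩ := List.mem_map.mp hmem
          have : (e : Int) = v := (List.cons.injEq .. ▸ heq.symm).1.symm
          have := List.mem_range.mp he
          omega

-- every visited tuple is pointwise between 0 and values
theorem pvVisit_valid (vs : List Int) (h : ∀ v ∈ vs, 0 ≤ v) :
    ∀ t ∈ pvVisit vs, List.Forall₂ (fun b v => 0 ≤ b ∧ b ≤ v) t vs := by
  induction vs with
  | nil => intro t ht; simp only [pvVisit, List.mem_singleton] at ht; subst ht; exact .nil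
  | cons v vs ih =>
      intro t ht
      obtain ⟨t', ht', hmem⟩ := List.mem_flatMap.mp ht
      obtain ⟨e, he, heq⟩ := List.mem_map.mp hmem
      have hv : 0 ≤ v := h v (List.mem_cons_self ..)
      have hle : (e : Int) ≤ v := by
        have := List.mem_range.mp he
        omega
      subst heq
      exact .cons ⟨Int.natCast_nonneg e, hle⟩
        (ih (fun x hx => h x (List.mem_cons_of_mem _ hx)) t' ht')

theorem pvCarry_id (t vs : List Int) (h : List.Forall₂ (fun b v => 0 ≤ b ∧ b ≤ v) t vs) :
    pvCarry t vs = t := by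
  induction h with
  | nil => rfl
  | cons hbv _ ih =>
      simp [pvCarry, not_lt.mpr hbv.2, ih]

theorem pvBlock_chain (v : Int) (vs t : List Int) (hv : 0 ≤ v) (ht : pvCarry t vs = t) :
    List.IsChain (pvStep (v :: vs)) ((List.range (v.toNat + 1)).map (fun e : Nat => ((e : Int) :: t))) := by
  rw [List.isChain_map]
  rw [List.isChain_range_succ]
  intro m hm
  have hle : (m : Int) + 1 ≤ v := by omega
  simp only [pvStep, pvBump, pvCarry, if_neg (not_lt.mpr hle), ht]
  push_cast
  ring_nf

theorem pvChain_flat (v : Int) (vs : List Int) (hv : 0 ≤ v) :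
    ∀ l : List (List Int), (∀ t ∈ l, pvCarry t vs = t) → List.IsChain (pvStep vs) l →
      List.IsChain (pvStep (v :: vs))
        (l.flatMap (fun t => (List.range (v.toNat + 1)).map (fun e : Nat => ((e : Int) :: t)))) := by
  intro l
  induction l with
  | nil => intro _ _; exact .nil
  | cons t l ih =>
      intro hid hchain
      rw [List.flatMap_cons, List.isChain_append]
      refine ⟨pvBlock_chain v vs t hv (hid t (List.mem_cons_self ..)), ?_, ?_⟩
      · exact ih (fun x hx => hid x (List.mem_cons_of_mem _ hx))
          ((List.isChain_cons).mp hchain).2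
      · intro x hx y hy
        cases l with
        | nil => simp at hy
        | cons t' l' =>
            -- x is the last of the block of t, y the head of the block of t'
            have hx' : x = v :: t := by
              simp only [List.getLast?_map, List.range_succ, List.getLast?_append,
                List.getLast?_singleton, Option.some_or, Option.map_some, Option.mem_def,
                Option.some.injEq] at hx
              rw [← hx]
              simp [Int.toNat_of_nonneg hv]
            have hy' : y = 0 :: t' := by
              simp only [List.flatMap_cons, List.head?_append, List.head?_map,
                List.range_succ_eq_map, List.head?_cons, Option.map_some, Option.some_or,
                Option.mem_def, Option.some.injEq] at hy
              rw [← hy]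
              simp
            have hstep : pvStep vs t t' := ((List.isChain_cons_cons ..).mp hchain).1
            subst hx' hy'
            show pvCarry (pvBump (v :: t)) (v :: vs) = 0 :: t'
            simp only [pvBump]
            simp only [pvCarry]
            rw [if_pos (by omega : v + 1 > v), hstep]

theorem pvVisit_chain (vs : List Int) (h : ∀ v ∈ vs, 0 ≤ v) :
    List.IsChain (pvStep vs) (pvVisit vs) := by
  induction vs with
  | nil => exact .singleton _
  | cons v vs ih =>
      exact pvChain_flat v vs (h v (List.mem_cons_self ..)) (pvVisit vs)
        (fun t ht => pvCarry_id t vs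
          (pvVisit_valid vs (fun x hx => h x (List.mem_cons_of_mem _ hx)) t ht))
        (ih (fun x hx => h x (List.mem_cons_of_mem _ hx)))

theorem pvLoop_run (target : Int) (ks vs : List Int) :
    ∀ (l : List (List Int)) (b : List Int) (fuel : Nat) (r : Int),
      List.IsChain (pvStep vs) (b :: l) → (b :: l).getLast? = some vs →
      vs ∉ (b :: l).dropLast → l.length ≤ fuel →
      pvLoopA target ks vs fuel b r = r + pvCnt target ks ((b :: l).dropLast) := by
  intro l
  induction l with
  | nil =>
      intro b fuel r _ hlast _ _
      simp only [List.getLast?_singleton, Option.some.injEq] at hlast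
      subst hlast
      cases fuel <;> simp [pvLoopA, pvCnt]
  | cons b' l ih =>
      intro b fuel r hchain hlast hnot hlen
      have hne : b ≠ vs := by
        intro hb
        exact hnot (by simp [hb, List.dropLast_cons_of_ne_nil])
      obtain ⟨f, rfl⟩ : ∃ f, fuel = f + 1 := ⟨fuel - 1, by simp at hlen; omega⟩
      have hstep : pvCarry (pvBump b) vs = b' := ((List.isChain_cons_cons ..).mp hchain).1
      simp only [pvLoopA, if_neg hne, hstep]
      rw [ih b' f _ ((List.isChain_cons_cons ..).mp hchain).2
        (by simpa using hlast)
        (by intro hm; exact hnot (by simp [List.dropLast_cons_of_ne_nil]; right; simpa using hm))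
        (by simp at hlen; omega)]
      have hdl : (b :: b' :: l).dropLast = b :: (b' :: l).dropLast := by
        simp [List.dropLast_cons_of_ne_nil]
      rw [hdl]
      simp only [pvCnt, List.map_cons, List.sum_cons]
      split_ifs <;> ring

theorem pvSum_flatMap {α : Type} (l : List α) (f : α → List Int) :
    (l.flatMap f).sum = (l.map fun a => (f a).sum).sum := by
  induction l with
  | nil => rfl
  | cons x xs ih => simp [ih]

theorem pvSum_swap {α β : Type} (l : List α) (m : List β) (h : α → β → Int) :
    (l.map fun a => (m.map (h a)).sum).sum = (m.map fun b => (l.map fun a => h a b).sum).sum := by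
  induction l with
  | nil => simp
  | cons x xs ih =>
      simp only [List.map_cons, List.sum_cons, ih]
      rw [← PySem.List.sum_map_add_int]

theorem pvCountB_eq (target : Int) :
    ∀ (arr : List (Int × Int)), (∀ p ∈ arr, 0 ≤ p.2) → ∀ prod : Int,
      pvCountB target arr prod =
        ((pvVisit (arr.map Prod.snd)).map
          fun t => if prod * pvTemp (arr.map Prod.fst) t ≤ target then (1 : Int) else 0).sum := by
  intro arr
  induction arr with
  | nil =>
      intro _ prod
      simp [pvCountB, pvVisit, pvTemp]
  | cons kv rest ih =>
      obtain ⟨k, v⟩ := kv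
      intro hpos prod
      have hv : 0 ≤ v := hpos (k, v) (List.mem_cons_self ..)
      have ihr := ih (fun p hp => hpos p (List.mem_cons_of_mem _ hp))
      simp only [pvCountB, PySem.List.foldl_add, zero_add]
      rw [PySem.List.pyRange_one 0 (v + 1)]
      have htn : (v + 1 - 0).toNat = v.toNat + 1 := by omega
      rw [htn, List.map_map]
      simp only [Function.comp_def, zero_add, Int.toNat_natCast, ihr]
      simp only [pvVisit, List.map_cons, List.map_flatMap]
      rw [pvSum_flatMap]
      refine (pvSum_swap (List.range (v.toNat + 1)) (pvVisit (rest.map Prod.snd))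
        (fun e t => if prod * k ^ e * pvTemp (rest.map Prod.fst) t ≤ target then (1 : Int) else 0)).trans ?_
      congr 1
      apply List.map_congr_left
      intro t _
      rw [List.map_map]
      congr 1
      apply List.map_congr_left
      intro e _
      simp only [Function.comp_def, pvTemp_cons, Int.toNat_natCast, ← mul_assoc]

theorem pvZip_proj (arr : List (Int × Int)) : (arr.map Prod.fst).zip (arr.map Prod.snd) = arr := by
  induction arr with
  | nil => rfl
  | cons x xs ih => simp [ih]

theorem pvCnt_append (target : Int) (ks : List Int) (l₁ l₂ : List (List Int)) :
    pvCnt target ks (l₁ ++ l₂) = pvCnt target ks l₁ + pvCnt target ks l₂ := by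
  simp [pvCnt]

-- ===== VERDICT (by name: the statement is the Claim_ definition above) =====
theorem solution_spec : Claim_equal_solution := by
  intro arr target _ hpre
  unfold Spec_solution
  obtain ⟨hpos, -⟩ := hpre
  by_cases harr : arr = []
  · subst harr; rfl
  · have hvs : ∀ v ∈ arr.map Prod.snd, 0 ≤ v := by
      intro v hv
      obtain ⟨p, hp, rfl⟩ := List.mem_map.mp hv
      exact hpos p hp
    obtain ⟨l, hsplit, hnotin⟩ := pvVisit_split (arr.map Prod.snd) hvs
    cases hv : pvVisit (arr.map Prod.snd) with
    | nil => exact absurd hv (pvVisit_ne_nil _)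
    | cons b rest =>
        have hb : b = List.replicate (arr.map Prod.snd).length 0 := by
          have := pvVisit_head (arr.map Prod.snd)
          rw [hv] at this
          simpa using this
        have hcr : b :: rest = l ++ [arr.map Prod.snd] := hv ▸ hsplit
        have hlenv : (arr.map Prod.snd).length = arr.length := List.length_map ..
        -- A side
        have hA : solution arr target =
            pvCnt target (arr.map Prod.fst) ((b :: rest).dropLast) := by
          rw [solution, if_neg harr]
          rw [show List.replicate arr.length (0 : Int) = b by rw [hb, hlenv]]
          rw [pvLoop_run target (arr.map Prod.fst) (arr.map Prod.snd) rest b (pvFuel (arr.map Prod.snd)) 0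
            (hv ▸ pvVisit_chain (arr.map Prod.snd) hvs)
            (by rw [hcr]; exact List.getLast?_concat ..)
            (by rw [hcr, List.dropLast_concat]; exact hnotin)
            (by
              have := pvVisit_length (arr.map Prod.snd)
              rw [hv] at this
              simp only [List.length_cons] at this
              omega)]
          ring
        -- B side
        have hfull : arr.foldl (fun f kv => f * kv.1 ^ kv.2.toNat) 1
            = pvTemp (arr.map Prod.fst) (arr.map Prod.snd) := by
          rw [pvTemp, pvZip_proj]
        have hB : solution_alt arr target =
            pvCnt target (arr.map Prod.fst) (b :: rest)
              - (if pvTemp (arr.map Prod.fst) (arr.map Prod.snd) ≤ target then (1 : Int) else 0) := by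
          rw [solution_alt, if_neg harr]
          simp only [hfull, pvCountB_eq target arr hpos 1, one_mul, ← hv, pvCnt]
        rw [hA, hB, hcr, List.dropLast_concat, pvCnt_append]
        simp [pvCnt]
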